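-- pv_equiv track=rewrite | github.com/Danil5115/Evolutionary-Simulation | Mountain climbing algorithm.py | backpack_value
-- ===== SOURCE A (Python) =====
-- def backpack_value(alpha, a, M):
--     cost, weight = 0, 0
--     for i, (w, c) in enumerate(a):
--         if alpha[i] == "1":
--             if weight + w <= M:
--                 weight += w
--                 cost += c
--             else:
--                 cost -= c
--                 weight += w
--     return cost
-- ===== SOURCE B (Python) =====
-- def backpack_value(alpha, a, M):
--     sel = [(w, c) for i, (w, c) in enumerate(a) if alpha[i] == "1"]
--     prefix = []
--     t = 0
--     for w, _ in sel:
--         t += w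
--         prefix.append(t)
--     return sum(c if p <= M else -c for (_, c), p in zip(sel, prefix))
-- ===== Notes on version B (the rewrite author's own statement) =====
-- stated objective: alternative
-- what changed: Replaces the single interleaved accumulate-and-decide loop carrying (cost, weight) state with three stateless passes: filter the selected items, build an inclusive prefix-weight table, then sum each value with a sign chosen by its prefix weight.
import Mathlib
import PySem

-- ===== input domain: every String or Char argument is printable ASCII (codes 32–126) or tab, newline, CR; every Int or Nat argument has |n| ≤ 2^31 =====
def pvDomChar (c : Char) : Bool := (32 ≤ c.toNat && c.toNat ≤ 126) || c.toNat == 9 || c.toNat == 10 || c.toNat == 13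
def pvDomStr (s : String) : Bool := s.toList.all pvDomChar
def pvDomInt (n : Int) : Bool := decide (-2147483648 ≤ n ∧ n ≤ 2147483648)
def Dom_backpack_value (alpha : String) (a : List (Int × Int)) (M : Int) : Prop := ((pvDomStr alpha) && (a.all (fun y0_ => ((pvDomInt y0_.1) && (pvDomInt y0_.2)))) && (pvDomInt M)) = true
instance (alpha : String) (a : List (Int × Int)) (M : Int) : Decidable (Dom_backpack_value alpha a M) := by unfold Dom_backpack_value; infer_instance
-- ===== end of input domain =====

-- ===== PORT A =====
-- B splits A's interleaved loop into filter + prefix-weight table + sign-summing pass; alternative decomposition, same O(n) cost.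
def backpack_value (alpha : String) (a : List (Int × Int)) (M : Int) : Int :=
  ((PySem.List.enumerate a 0).foldl
    (fun (st : Int × Int) (p : Int × Int × Int) =>
      match PySem.Str.pyGet? alpha p.1 with
      | some ch =>
        if ch = '1' then
          if st.2 + p.2.1 ≤ M then (st.1 + p.2.2, st.2 + p.2.1)
          else (st.1 - p.2.2, st.2 + p.2.1)
        else st
      | none => st)   -- Python raises IndexError here; excluded by Pre_
    (0, 0)).1

-- ===== PORT B =====
def backpack_value_alt (alpha : String) (a : List (Int × Int)) (M : Int) : Int :=
  let sel : List (Int × Int) :=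
    ((PySem.List.enumerate a 0).filter
      (fun p => PySem.Str.pyGet? alpha p.1 == some '1')).map (fun p => p.2)
  let pr : List Int :=
    (sel.foldl (fun (st : Int × List Int) q => (st.1 + q.1, st.2 ++ [st.1 + q.1])) (0, [])).2
  ((sel.zip pr).map (fun q => if q.2 ≤ M then q.1.2 else -q.1.2)).sum

-- ===== PRECONDITION & SPEC =====
-- Pre_ excludes exactly the inputs where Python A raises IndexError: alpha shorter than a.
def Pre_backpack_value (alpha : String) (a : List (Int × Int)) (M : Int) : Prop :=
  a.length ≤ alpha.toList.length
instance (alpha : String) (a : List (Int × Int)) (M : Int) : Decidable (Pre_backpack_value alpha a M) := by unfold Pre_backpack_value; infer_instance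
def pvWitness_backpack_value : String × (List (Int × Int)) × Int := ("101", [(1, 2), (3, 4), (2, 5)], 3)

def Spec_backpack_value (alpha : String) (a : List (Int × Int)) (M : Int) (out : Int) : Prop := out = backpack_value_alt alpha a M
instance (alpha : String) (a : List (Int × Int)) (M : Int) (out : Int) : Decidable (Spec_backpack_value alpha a M out) := by unfold Spec_backpack_value; infer_instance

-- ===== CLAIM (what is proved, stated in full; the proofs are below) =====
def Claim_equal_backpack_value : Prop := ∀ (alpha : String) (a : List (Int × Int)) (M : Int), Dom_backpack_value alpha a M → Pre_backpack_value alpha a M → Spec_backpack_value alpha a M (backpack_value alpha a M)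

-- ===== LEMMAS AND PROOFS =====

-- the selected items (value of B's `sel` over a suffix enumerated from k)
def pvSel (alpha : String) (l : List (Int × Int)) (k : Int) : List (Int × Int) :=
  ((PySem.List.enumerate l k).filter
    (fun p => PySem.Str.pyGet? alpha p.1 == some '1')).map (fun p => p.2)

-- the common semantic core: signed sum with running inclusive prefix weight t
def pvSig (M t : Int) : List (Int × Int) → Int
  | [] => 0
  | (w, c) :: s => (if t + w ≤ M then c else -c) + pvSig M (t + w) s

lemma pvSel_nil (alpha : String) (k : Int) : pvSel alpha [] k = [] := by
  simp [pvSel, PySem.List.enumerate_nil]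

lemma pvSel_cons (alpha : String) (w c k : Int) (t : List (Int × Int)) :
    pvSel alpha ((w, c) :: t) k =
      (if PySem.Str.pyGet? alpha k == some '1' then [(w, c)] else []) ++ pvSel alpha t (k + 1) := by
  simp only [pvSel, PySem.List.enumerate_cons, List.filter_cons]
  split_ifs with h <;> simp [h]

lemma pvA_eq (alpha : String) (M : Int) :
    ∀ (l : List (Int × Int)) (k cost weight : Int),
    ((PySem.List.enumerate l k).foldl
      (fun (st : Int × Int) (p : Int × Int × Int) =>
        match PySem.Str.pyGet? alpha p.1 with
        | some ch =>
          if ch = '1' then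
            if st.2 + p.2.1 ≤ M then (st.1 + p.2.2, st.2 + p.2.1)
            else (st.1 - p.2.2, st.2 + p.2.1)
          else st
        | none => st)
      (cost, weight)).1 = cost + pvSig M weight (pvSel alpha l k) := by
  intro l
  induction l with
  | nil => intro k cost weight; simp [PySem.List.enumerate_nil, pvSel_nil, pvSig]
  | cons hd tl ih =>
    intro k cost weight
    obtain ⟨w, c⟩ := hd
    rw [PySem.List.enumerate_cons, List.foldl_cons, pvSel_cons]
    cases hg : PySem.Str.pyGet? alpha k with
    | none => simp only [hg]; rw [ih]; simp [hg]
    | some ch =>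
      by_cases h1 : ch = '1'
      · subst h1
        simp only [hg, if_pos rfl, beq_iff_eq]
        by_cases hle : weight + w ≤ M
        · rw [if_pos hle]; rw [ih]; simp [pvSig, hle]; ring
        · rw [if_neg hle]; rw [ih]; simp [pvSig, hle]; ring
      · simp only [if_neg h1]
        rw [ih]
        have : (some ch == some '1') = false := by simp [h1]
        simp [this]

-- B's prefix-table loop, generalized
lemma pvPrefix_eq (s : List (Int × Int)) :
    ∀ (t : Int) (acc : List Int),
    (s.foldl (fun (st : Int × List Int) q => (st.1 + q.1, st.2 ++ [st.1 + q.1])) (t, acc)).2 =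
      acc ++ (s.foldl (fun (st : Int × List Int) q => (st.1 + q.1, st.2 ++ [st.1 + q.1])) (t, [])).2 := by
  induction s with
  | nil => intro t acc; simp
  | cons hd tl ih =>
    intro t acc
    simp only [List.foldl_cons, List.nil_append]
    rw [ih, ih (t + hd.1) [t + hd.1]]
    simp

lemma pvZip_eq (M : Int) :
    ∀ (s : List (Int × Int)) (t : Int),
    ((s.zip ((s.foldl (fun (st : Int × List Int) q => (st.1 + q.1, st.2 ++ [st.1 + q.1])) (t, [])).2)).map
      (fun q => if q.2 ≤ M then q.1.2 else -q.1.2)).sum = pvSig M t s := by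
  intro s
  induction s with
  | nil => intro t; simp [pvSig]
  | cons hd tl ih =>
    intro t
    obtain ⟨w, c⟩ := hd
    simp only [List.foldl_cons, List.nil_append]
    rw [pvPrefix_eq tl (t + w) [t + w]]
    simp only [List.cons_append, List.nil_append, List.zip_cons_cons, List.map_cons, List.sum_cons]
    rw [ih (t + w)]
    simp [pvSig]

lemma pvB_eq (alpha : String) (a : List (Int × Int)) (M : Int) :
    backpack_value_alt alpha a M = pvSig M 0 (pvSel alpha a 0) := by
  unfold backpack_value_alt
  exact pvZip_eq M (pvSel alpha a 0) 0

-- ===== VERDICT (by name: the statement is the Claim_ definition above) =====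
theorem backpack_value_spec : Claim_equal_backpack_value := by
  intro alpha a M _ _
  unfold Spec_backpack_value backpack_value
  rw [pvA_eq, pvB_eq]
  simp
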